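-- pv_equiv track=rewrite | github.com/xVapure/Noteab-Macro | biome_tracker/mixin_actions.py | _build_auto_pop_buffs_to_use
-- ===== SOURCE A (Python) =====
-- def _build_auto_pop_buffs_to_use(buff_config):
--     buffs_to_use = []
--     priority_order = [
--         "Xyz Potion",
--         "Transcendent Potion",
--         "Warp Potion",
--         "Heavenly Potion",
--         "Godlike Potion",
--         "Potion of bound",
--         "Oblivion Potion",
--     ]
--
--     if not isinstance(buff_config, dict):
--         return buffs_to_use
--
--     def _read_buff_state(raw_value):
--         try:
--             if isinstance(raw_value, (list, tuple)) and len(raw_value) >= 2: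
--                 return bool(raw_value[0]), max(1, int(raw_value[1]))
--         except Exception:
--             pass
--         return False, 1
--
--     for buff_name in priority_order:
--         enabled, amount = _read_buff_state(buff_config.get(buff_name))
--         if enabled:
--             buffs_to_use.append((buff_name, amount))
--
--     for buff_name, raw_value in buff_config.items():
--         if buff_name in priority_order:
--             continue
--         enabled, amount = _read_buff_state(raw_value)
--         if enabled:
--             buffs_to_use.append((buff_name, amount))
--
--     return buffs_to_use
-- ===== SOURCE B (Python) =====
-- def _build_auto_pop_buffs_to_use(buff_config):
--     priority_order = [
--         "Xyz Potion",
--         "Transcendent Potion",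
--         "Warp Potion",
--         "Heavenly Potion",
--         "Godlike Potion",
--         "Potion of bound",
--         "Oblivion Potion",
--     ]
--
--     if not isinstance(buff_config, dict):
--         return []
--
--     def _read_buff_state(raw_value):
--         try:
--             if isinstance(raw_value, (list, tuple)) and len(raw_value) >= 2:
--                 return bool(raw_value[0]), max(1, int(raw_value[1]))
--         except Exception:
--             pass
--         return False, 1
--
--     # One pass over the dict: drop each enabled buff into its priority bucket
--     # (bucket 7 = non-priority buffs, kept in insertion order), then flatten.
--     rank = {name: i for i, name in enumerate(priority_order)}
--     buckets = [[] for _ in range(len(priority_order) + 1)]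
--     for buff_name, raw_value in buff_config.items():
--         enabled, amount = _read_buff_state(raw_value)
--         if enabled:
--             buckets[rank.get(buff_name, len(priority_order))].append((buff_name, amount))
--     return [pair for bucket in buckets for pair in bucket]
-- ===== Notes on version B (the rewrite author's own statement) =====
-- stated objective: alternative
-- what changed: A makes one dict lookup per priority name and then a second filtered sweep over the dict; B does a single pass over the dict items dropping each enabled buff into a rank-indexed bucket (rank dict built from the priority list, bucket 7 = non-priority in insertion order) and flattens the buckets.
import Mathlib
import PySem

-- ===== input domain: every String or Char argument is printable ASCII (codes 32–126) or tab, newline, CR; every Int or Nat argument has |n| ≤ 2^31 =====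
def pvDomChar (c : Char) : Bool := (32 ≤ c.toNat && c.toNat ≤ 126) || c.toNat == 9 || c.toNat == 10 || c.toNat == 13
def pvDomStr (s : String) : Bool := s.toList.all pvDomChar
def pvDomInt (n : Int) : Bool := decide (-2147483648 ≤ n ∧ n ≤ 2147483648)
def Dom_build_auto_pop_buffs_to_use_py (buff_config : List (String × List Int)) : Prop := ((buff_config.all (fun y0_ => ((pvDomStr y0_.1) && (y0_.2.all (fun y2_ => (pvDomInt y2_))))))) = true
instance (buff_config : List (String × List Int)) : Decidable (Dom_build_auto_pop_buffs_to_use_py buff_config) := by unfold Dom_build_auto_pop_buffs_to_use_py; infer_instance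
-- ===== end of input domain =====

-- B replaces A's two passes (one dict lookup per priority name, then a filtered second sweep)
-- by a single pass over the dict that drops each enabled buff into a rank-indexed bucket
-- (bucket 7 = non-priority, insertion order) and flattens; objective: alternative decomposition.

-- ===== PORT A =====
-- shared literal: the priority list both Pythons spell out
def pvPriorityOrder : List String :=
  ["Xyz Potion", "Transcendent Potion", "Warp Potion", "Heavenly Potion",
   "Godlike Potion", "Potion of bound", "Oblivion Potion"]

-- _read_buff_state(raw_value): raw is a list of ints (or None from dict.get);
-- len >= 2 → (bool(raw[0]), max(1, int(raw[1]))); otherwise (False, 1). No exception occurs on this type.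
def pvReadBuffState (raw : Option (List Int)) : Bool × Int :=
  match raw with
  | some v => if 2 ≤ v.length then ((v.getD 0 0) != 0, max 1 (v.getD 1 0)) else (false, 1)
  | none => (false, 1)

def build_auto_pop_buffs_to_use_py (buff_config : List (String × List Int)) : List (String × Int) :=
  let d := PySem.Dict.ofList buff_config
  let first := pvPriorityOrder.foldl
    (fun acc name =>
      let st := pvReadBuffState (d.get? name)
      if st.1 then acc ++ [(name, st.2)] else acc) []
  d.items.foldl
    (fun acc p =>
      if p.1 ∈ pvPriorityOrder then acc
      else
        let st := pvReadBuffState (some p.2)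
        if st.1 then acc ++ [(p.1, st.2)] else acc) first

-- ===== PORT B =====
-- rank = {name: i for i, name in enumerate(priority_order)}
def pvRank : PySem.Dict String Int :=
  PySem.Dict.ofList ((PySem.List.enumerate pvPriorityOrder).map (fun p => (p.2, p.1)))

def build_auto_pop_buffs_to_use_py_alt (buff_config : List (String × List Int)) : List (String × Int) :=
  let d := PySem.Dict.ofList buff_config
  let buckets := d.items.foldl
    (fun (bs : List (List (String × Int))) p =>
      let st := pvReadBuffState (some p.2)
      if st.1 then
        -- rank.get(name, 7) is always in 0..7, so .toNat is exact and buckets[r] is in range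
        let r := (pvRank.getD p.1 (pvPriorityOrder.length : Int)).toNat
        bs.set r (bs.getD r [] ++ [(p.1, st.2)])
      else bs)
    (List.replicate (pvPriorityOrder.length + 1) [])
  buckets.flatten

-- ===== PRECONDITION & SPEC =====
def Spec_build_auto_pop_buffs_to_use_py (buff_config : List (String × List Int)) (out : List (String × Int)) : Prop := out = build_auto_pop_buffs_to_use_py_alt buff_config
instance (buff_config : List (String × List Int)) (out : List (String × Int)) : Decidable (Spec_build_auto_pop_buffs_to_use_py buff_config out) := by unfold Spec_build_auto_pop_buffs_to_use_py; infer_instance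

-- ===== CLAIM (what is proved, stated in full; the proofs are below) =====
def Claim_equal_build_auto_pop_buffs_to_use_py : Prop := ∀ (buff_config : List (String × List Int)), Dom_build_auto_pop_buffs_to_use_py buff_config → Spec_build_auto_pop_buffs_to_use_py buff_config (build_auto_pop_buffs_to_use_py buff_config)

-- ===== LEMMAS AND PROOFS =====

def pvEnab (p : String × List Int) : Bool := (pvReadBuffState (some p.2)).1
def pvStrip (p : String × List Int) : String × Int := (p.1, (pvReadBuffState (some p.2)).2)
def pvRankN (name : String) : Nat := (pvRank.getD name (pvPriorityOrder.length : Int)).toNat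

-- final contents of bucket i, as a filter over the items list
def pvG (i : Nat) (l : List (String × List Int)) : List (String × Int) :=
  (l.filter (fun p => pvEnab p && pvRankN p.1 == i)).map pvStrip

-- what A's priority loop appends for one name
def pvCA (l : List (String × List Int)) (k : String) : List (String × Int) :=
  let st := pvReadBuffState ((PySem.Dict.mk l).get? k)
  if st.1 then [(k, st.2)] else []

theorem pvRankN_chain (n : String) : pvRankN n =
    if n = "Xyz Potion" then 0 else if n = "Transcendent Potion" then 1
    else if n = "Warp Potion" then 2 else if n = "Heavenly Potion" then 3
    else if n = "Godlike Potion" then 4 else if n = "Potion of bound" then 5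
    else if n = "Oblivion Potion" then 6 else 7 := by
  have h : pvRank = PySem.Dict.mk [("Xyz Potion",0),("Transcendent Potion",1),("Warp Potion",2),("Heavenly Potion",3),("Godlike Potion",4),("Potion of bound",5),("Oblivion Potion",6)] := by rfl
  rw [pvRankN, h]
  rw [PySem.Dict.getD_eq_get?_getD]
  simp only [PySem.Dict.get?_mk_cons, beq_iff_eq]
  have hl : (pvPriorityOrder.length : Int) = 7 := by rfl
  rw [hl]
  by_cases h0 : "Xyz Potion" = n
  · rw [if_pos h0, if_pos h0.symm]; rfl
  rw [if_neg h0, if_neg (fun hh : n = "Xyz Potion" => h0 hh.symm)]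
  by_cases h1 : "Transcendent Potion" = n
  · rw [if_pos h1, if_pos h1.symm]; rfl
  rw [if_neg h1, if_neg (fun hh : n = "Transcendent Potion" => h1 hh.symm)]
  by_cases h2 : "Warp Potion" = n
  · rw [if_pos h2, if_pos h2.symm]; rfl
  rw [if_neg h2, if_neg (fun hh : n = "Warp Potion" => h2 hh.symm)]
  by_cases h3 : "Heavenly Potion" = n
  · rw [if_pos h3, if_pos h3.symm]; rfl
  rw [if_neg h3, if_neg (fun hh : n = "Heavenly Potion" => h3 hh.symm)]
  by_cases h4 : "Godlike Potion" = n
  · rw [if_pos h4, if_pos h4.symm]; rfl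
  rw [if_neg h4, if_neg (fun hh : n = "Godlike Potion" => h4 hh.symm)]
  by_cases h5 : "Potion of bound" = n
  · rw [if_pos h5, if_pos h5.symm]; rfl
  rw [if_neg h5, if_neg (fun hh : n = "Potion of bound" => h5 hh.symm)]
  by_cases h6 : "Oblivion Potion" = n
  · rw [if_pos h6, if_pos h6.symm]; rfl
  rw [if_neg h6, if_neg (fun hh : n = "Oblivion Potion" => h6 hh.symm)]
  rfl

theorem pvRankN_le (n : String) : pvRankN n ≤ 7 := by
  rw [pvRankN_chain]; split_ifs <;> omega

theorem pvRankN_eq_seven_iff (n : String) : (pvRankN n = 7) ↔ n ∉ pvPriorityOrder := by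
  rw [pvRankN_chain]; simp [pvPriorityOrder]; split_ifs <;> simp_all

theorem pvRankN_eq_iff (n : String) (i : Nat) (hi : i < 7) :
    (pvRankN n = i) ↔ n = pvPriorityOrder.getD i "" := by
  rw [pvRankN_chain]
  interval_cases i <;> (simp [pvPriorityOrder]; split_ifs <;> simp_all)

-- the single-key filter is what dict.get sees, given unique keys
theorem pv_filter_key (k : String) (l : List (String × List Int))
    (hnd : (l.map Prod.fst).Nodup) :
    (l.filter (fun p => pvEnab p && p.1 == k)).map pvStrip =
      (match (PySem.Dict.mk l).get? k with
       | none => []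
       | some v => if (pvReadBuffState (some v)).1
                   then [(k, (pvReadBuffState (some v)).2)] else []) := by
  induction l with
  | nil => rfl
  | cons a t ih =>
    simp only [List.map_cons, List.nodup_cons] at hnd
    rw [PySem.Dict.get?_mk_cons]
    by_cases hk : a.1 = k
    · rw [if_pos (by simpa using hk)]
      have ht : t.filter (fun p => pvEnab p && p.1 == k) = [] := by
        apply List.filter_eq_nil_iff.2
        intro p hp
        have : p.1 ∈ t.map Prod.fst := List.mem_map.2 ⟨p, hp, rfl⟩
        simp only [Bool.and_eq_true, beq_iff_eq]
        rintro ⟨-, rfl⟩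
        exact hnd.1 (hk ▸ this)
      by_cases he : pvEnab a
      · rw [List.filter_cons_of_pos (by simp [he, hk]), ht]
        have he' : (pvReadBuffState (some a.2)).1 = true := he
        simp [pvStrip, he', hk]
      · rw [List.filter_cons_of_neg (by simp [he]), ht]
        simp [pvEnab] at he
        simp [he]
    · rw [if_neg (by simpa using hk), List.filter_cons_of_neg (by simp [hk])]
      exact ih hnd.2

-- B's bucket fold, characterised
theorem pv_foldB_inv (l : List (String × List Int)) :
    ∀ (bs : List (List (String × Int))), bs.length = 8 →
    l.foldl
      (fun (bs : List (List (String × Int))) p =>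
        let st := pvReadBuffState (some p.2)
        if st.1 then
          let r := (pvRank.getD p.1 (pvPriorityOrder.length : Int)).toNat
          bs.set r (bs.getD r [] ++ [(p.1, st.2)])
        else bs) bs
    = List.ofFn (n := 8) (fun i => bs.getD i [] ++ pvG i l) := by
  induction l with
  | nil =>
    intro bs h
    simp only [List.foldl_nil, pvG, List.filter_nil, List.map_nil, List.append_nil]
    apply List.ext_getElem (by simp [h])
    intro i h1 h2
    simp only [List.getElem_ofFn]
    rw [List.getD_eq_getElem bs [] (by omega)]
  | cons a t ih =>
    intro bs h
    simp only [List.foldl_cons]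
    by_cases he : (pvReadBuffState (some a.2)).1 = true
    · rw [if_pos he]
      rw [ih _ (by simpa using h)]
      apply List.ext_getElem (by simp)
      intro i h1 h2
      simp only [List.length_ofFn] at h1 h2
      simp only [List.getElem_ofFn]
      have hr : pvRankN a.1 < 8 := Nat.lt_succ_of_le (pvRankN_le a.1)
      rw [show (pvRank.getD a.1 (pvPriorityOrder.length : Int)).toNat = pvRankN a.1 from rfl]
      have hGc : pvG i (a :: t) =
          if pvEnab a && pvRankN a.1 == i then pvStrip a :: pvG i t else pvG i t := by
        by_cases hc : (pvEnab a && pvRankN a.1 == i) = true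
        · rw [if_pos hc]; unfold pvG; simp only [List.filter_cons, hc, if_pos]; rfl
        · rw [if_neg hc]; unfold pvG; simp only [List.filter_cons, hc]; rw [if_neg]; simp
      by_cases hi : i = pvRankN a.1
      · have : pvEnab a && pvRankN a.1 == i := by simp [pvEnab, he, hi]
        rw [hGc, if_pos this]
        subst hi
        rw [List.getD_eq_getElem (bs.set (pvRankN a.1) (bs.getD (pvRankN a.1) [] ++ [(a.1, (pvReadBuffState (some a.2)).2)])) [] (by simp only [List.length_set, h]; omega)]
        rw [List.getElem_set_self]
        rw [List.getD_eq_getElem bs [] (by omega)]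
        simp [pvStrip]
      · have hne : ¬(pvEnab a && pvRankN a.1 == i) = true := by simp; intro _; omega
        rw [hGc, if_neg hne]
        rw [List.getD_eq_getElem (bs.set (pvRankN a.1) (bs.getD (pvRankN a.1) [] ++ [(a.1, (pvReadBuffState (some a.2)).2)])) [] (by simp only [List.length_set, h]; omega)]
        rw [List.getElem_set_ne (by omega)]
        rw [List.getD_eq_getElem bs [] (show i < bs.length by omega)]
    · rw [if_neg he, ih _ h]
      apply congrArg
      funext i
      have : pvG i (a :: t) = pvG i t := by
        unfold pvG; rw [List.filter_cons_of_neg (by simp [pvEnab, he])]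
      rw [this]

-- A's priority loop, as a flatMap
theorem pv_foldA (l : List (String × List Int)) (names : List String)
    (acc : List (String × Int)) :
    names.foldl
      (fun acc name =>
        let st := pvReadBuffState ((PySem.Dict.mk l).get? name)
        if st.1 then acc ++ [(name, st.2)] else acc) acc
    = acc ++ names.flatMap (pvCA l) := by
  induction names generalizing acc with
  | nil => simp
  | cons n t iht =>
    simp only [List.foldl_cons, List.flatMap_cons]
    rw [iht]
    unfold pvCA
    split_ifs with hsp <;> simp [hsp]

theorem pvG_single (l : List (String × List Int)) (hnd : (l.map Prod.fst).Nodup)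
    (i : Nat) (hi : i < 7) :
    pvG i l = pvCA l (pvPriorityOrder.getD i "") := by
  unfold pvG
  rw [List.filter_congr (l := l)
      (q := fun p => pvEnab p && p.1 == pvPriorityOrder.getD i "")
      (fun p _ => by
        rcases hb : pvEnab p with _ | _
        · simp [hb]
        · simp only [hb, Bool.true_and]
          rw [Bool.eq_iff_iff]
          simp only [beq_iff_eq]
          exact pvRankN_eq_iff p.1 i hi)]
  rw [pv_filter_key _ _ hnd]
  unfold pvCA
  rcases hg : (PySem.Dict.mk l).get? (pvPriorityOrder.getD i "") with _ | v
  · simp [pvReadBuffState]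
  · simp

theorem pvG_seven (l : List (String × List Int)) :
    (l.filter (fun p => !decide (p.1 ∈ pvPriorityOrder) && pvEnab p)).map pvStrip = pvG 7 l := by
  unfold pvG
  rw [List.filter_congr (l := l)
      (q := fun p => pvEnab p && pvRankN p.1 == 7)
      (fun p _ => by
        rcases hb : pvEnab p with _ | _
        · simp [hb]
        · simp only [hb, Bool.true_and, Bool.and_true]
          rw [Bool.eq_iff_iff]
          simp only [beq_iff_eq, Bool.not_eq_eq_eq_not, Bool.not_true, decide_eq_false_iff_not]
          exact (pvRankN_eq_seven_iff p.1).symm)]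

-- A's whole output, bucket by bucket
theorem pv_A_eq (l : List (String × List Int)) (hnd : (l.map Prod.fst).Nodup) :
    (pvPriorityOrder.foldl
      (fun acc name =>
        let st := pvReadBuffState ((PySem.Dict.mk l).get? name)
        if st.1 then acc ++ [(name, st.2)] else acc) [])
    ++ (l.filter (fun p => !decide (p.1 ∈ pvPriorityOrder) && pvEnab p)).map pvStrip
    = pvG 0 l ++ (pvG 1 l ++ (pvG 2 l ++ (pvG 3 l ++ (pvG 4 l ++ (pvG 5 l ++ (pvG 6 l ++ pvG 7 l)))))) := by
  rw [pv_foldA, pvG_seven]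
  rw [pvG_single l hnd 0 (by omega), pvG_single l hnd 1 (by omega), pvG_single l hnd 2 (by omega),
      pvG_single l hnd 3 (by omega), pvG_single l hnd 4 (by omega), pvG_single l hnd 5 (by omega),
      pvG_single l hnd 6 (by omega)]
  simp [pvPriorityOrder]

theorem pv_final (bc : List (String × List Int)) :
    build_auto_pop_buffs_to_use_py bc = build_auto_pop_buffs_to_use_py_alt bc := by
  unfold build_auto_pop_buffs_to_use_py build_auto_pop_buffs_to_use_py_alt
  dsimp only
  set d := PySem.Dict.ofList bc with hd
  have hnd : ((d.items).map Prod.fst).Nodup := by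
    have := PySem.Dict.nodup_keys_ofList (κ := String) (ν := List Int) bc
    simpa [PySem.Dict.keys, hd] using this
  -- B side
  rw [pv_foldB_inv d.items (List.replicate (pvPriorityOrder.length + 1) []) (by rfl)]
  -- A side: reshape the second loop into the append-if form
  have hfun : (fun (acc : List (String × Int)) (p : String × List Int) =>
      if p.1 ∈ pvPriorityOrder then acc
      else
        let st := pvReadBuffState (some p.2)
        if st.1 then acc ++ [(p.1, st.2)] else acc)
      = (fun acc p => if (!decide (p.1 ∈ pvPriorityOrder) && pvEnab p) = true then acc ++ [pvStrip p] else acc) := by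
    funext acc p
    by_cases hm : p.1 ∈ pvPriorityOrder
    · simp [hm]
    · by_cases he : pvEnab p = true
      · have he' : (pvReadBuffState (some p.2)).1 = true := he
        simp [hm, he', pvEnab, pvStrip]
      · have he' : (pvReadBuffState (some p.2)).1 = false := by simpa [pvEnab] using he
        simp [hm, he', pvEnab]
  rw [hfun, PySem.List.foldl_append_if]
  rw [show (fun acc name =>
      let st := pvReadBuffState (d.get? name)
      if st.1 = true then acc ++ [(name, st.2)] else acc)
    = (fun acc name =>
      let st := pvReadBuffState ((PySem.Dict.mk d.items).get? name)
      if st.1 = true then acc ++ [(name, st.2)] else acc) from rfl]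
  rw [pv_A_eq d.items hnd]
  -- flatten the ofFn of 8 buckets
  simp [List.ofFn_succ, List.flatten]

-- ===== VERDICT (by name: the statement is the Claim_ definition above) =====
theorem build_auto_pop_buffs_to_use_py_spec : Claim_equal_build_auto_pop_buffs_to_use_py := by
  intro bc _
  unfold Spec_build_auto_pop_buffs_to_use_py
  exact pv_final bc
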